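-- pv_equiv track=rewrite | github.com/kmohite77/python3-course | solution.py | strip_punctuation
-- ===== SOURCE A (Python) =====
-- def strip_punctuation(str):
--     lst_chars = list(str)
--     lst_chars_new = []
--     word_new = ""
--
--     for char in lst_chars:
--         if char not in punctuation_chars:
--             lst_chars_new.append(char)
--
--     return word_new.join(lst_chars_new)
--
-- punctuation_chars = ["'", '"', ",", ".", "!", ":", ";", '#', '@']
-- ===== SOURCE B (Python) =====
-- punctuation_chars = ["'", '"', ",", ".", "!", ":", ";", '#', '@']
--
-- def strip_punctuation(str):
--     table = {ord(c): None for c in punctuation_chars}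
--     return str.translate(table)
-- ===== Notes on version B (the rewrite author's own statement) =====
-- stated objective: faster
-- what changed: Replaces the explicit per-character loop with append-list and join by a precomputed ord->None deletion table passed to str.translate, a single table-driven pass with no per-char membership scan.
import Mathlib
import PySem

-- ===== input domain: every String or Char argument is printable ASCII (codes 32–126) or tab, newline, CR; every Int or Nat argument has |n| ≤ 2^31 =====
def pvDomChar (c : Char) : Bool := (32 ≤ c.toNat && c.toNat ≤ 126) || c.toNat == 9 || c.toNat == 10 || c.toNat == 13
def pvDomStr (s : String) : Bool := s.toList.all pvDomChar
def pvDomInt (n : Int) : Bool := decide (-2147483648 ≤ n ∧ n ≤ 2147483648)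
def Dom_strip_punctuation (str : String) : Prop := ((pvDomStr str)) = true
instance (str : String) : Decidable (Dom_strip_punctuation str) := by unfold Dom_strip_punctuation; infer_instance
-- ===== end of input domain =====

-- B replaces A's explicit filtering loop (append to a list, then join) by a precomputed
-- ord->None deletion table and one table-driven translate pass (objective: idiomatic).

-- ===== PORT A =====
def punctuation_chars : List Char := ['\'', '"', ',', '.', '!', ':', ';', '#', '@']

def strip_punctuation (str : String) : String :=
  let lst_chars := str.toList
  let lst_chars_new :=
    lst_chars.foldl
      (fun acc char => if punctuation_chars.contains char = false then acc ++ [char] else acc) []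
  -- word_new.join(lst_chars_new) with word_new = "": joining single-character strings
  PySem.Str.join "" (lst_chars_new.map (fun c => String.ofList [c]))

-- ===== PORT B =====
-- table = {ord(c): None for c in punctuation_chars}
def pvTable : PySem.Dict Int (Option String) :=
  punctuation_chars.foldl (fun d c => d.insert (c.toNat : Int) none) PySem.Dict.empty

-- str.translate(table): per code point, a key present (mapped to None) deletes the character,
-- an absent key keeps it (hand port of translate, exact for this all-None ASCII table).
def strip_punctuation_alt (str : String) : String :=
  String.ofList (str.toList.filterMap
    (fun c => match pvTable.get? (c.toNat : Int) with
              | some _ => none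
              | none => some c))

-- ===== PRECONDITION & SPEC =====
def Spec_strip_punctuation (str : String) (out : String) : Prop := out = strip_punctuation_alt str
instance (str : String) (out : String) : Decidable (Spec_strip_punctuation str out) := by unfold Spec_strip_punctuation; infer_instance

-- ===== CLAIM (what is proved, stated in full; the proofs are below) =====
def Claim_equal_strip_punctuation : Prop := ∀ (str : String), Dom_strip_punctuation str → Spec_strip_punctuation str (strip_punctuation str)

-- ===== LEMMAS AND PROOFS =====

-- comparing code points (as Python ints) is comparing the characters
theorem beq_codes (d c : Char) : ((d.toNat : Int) == (c.toNat : Int)) = (c == d) := by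
  by_cases h : c = d
  · subst h; simp
  · have hn : d.toNat ≠ c.toNat := fun hh => h (Char.ext (UInt32.toNat_inj.mp hh)).symm
    simp [h]
    omega

-- the comprehension builds this literal dict
theorem pvTable_eval : pvTable = PySem.Dict.mk
    [(('\''.toNat : Int), none), (('"'.toNat : Int), none), ((','.toNat : Int), none),
     (('.'.toNat : Int), none), (('!'.toNat : Int), none), ((':'.toNat : Int), none),
     ((';'.toNat : Int), none), (('#'.toNat : Int), none), (('@'.toNat : Int), none)] := by decide

-- table lookup succeeds exactly on punctuation characters
theorem pvTable_get? (c : Char) :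
    pvTable.get? (c.toNat : Int) =
      if punctuation_chars.contains c then some none else none := by
  rw [pvTable_eval]
  simp only [PySem.Dict.get?_mk_cons, beq_codes]
  split_ifs <;> simp_all [punctuation_chars]
  rfl

-- A's foldl-append loop is a filter
theorem foldA (l acc : List Char) :
    l.foldl (fun acc char => if punctuation_chars.contains char = false then acc ++ [char] else acc) acc
      = acc ++ l.filter (fun c => punctuation_chars.contains c = false) := by
  induction l generalizing acc with
  | nil => simp
  | cons x xs ih =>
    rw [List.foldl_cons, ih]
    by_cases h : x ∈ punctuation_chars <;> simp [h]

-- B's table-driven pass is the same filter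
theorem filtB (l : List Char) :
    l.filterMap (fun c => match pvTable.get? (c.toNat : Int) with
                          | some _ => none
                          | none => some c)
      = l.filter (fun c => punctuation_chars.contains c = false) := by
  induction l with
  | nil => rfl
  | cons x xs ih =>
    rw [List.filterMap_cons, ih, pvTable_get? x]
    by_cases h : x ∈ punctuation_chars <;> simp [h]

-- "".join of single-character strings rebuilds the string of those characters
theorem join_singletons (cs : List Char) :
    PySem.Str.join "" (cs.map (fun c => String.ofList [c])) = String.ofList cs := by
  apply String.toList_injective
  rw [PySem.Str.toList_join]
  simp only [List.map_map]
  have : (cs.map (String.toList ∘ fun c => String.ofList [c])) = cs.map ([·]) := by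
    simp [Function.comp]
  rw [this]
  simp [PySem.Chars.join_nil_singletons]

-- ===== VERDICT (by name: the statement is the Claim_ definition above) =====
theorem strip_punctuation_spec : Claim_equal_strip_punctuation := by
  intro s _
  unfold Spec_strip_punctuation strip_punctuation strip_punctuation_alt
  dsimp only
  rw [foldA, filtB, List.nil_append, join_singletons]
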